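-- pv_equiv track=rewrite | github.com/ereinha3/eznas | orchestrator/pipeline/enrichment.py | _find_grab_key
-- ===== SOURCE A (Python) =====
-- from typing import Any, Dict, List, Optional, Set
--
-- def _find_grab_key(torrent_name: str, grabbed: dict) -> Optional[str]:
--     """Find the grab key for a torrent by matching name prefix."""
--     # Exact match on stored torrent_name
--     for key, info in grabbed.items():
--         if info.get("torrent_name") == torrent_name:
--             return key
--     # Fallback: key is title[:120]
--     for key in grabbed:
--         if torrent_name.startswith(key[:100]):
--             return key
--     return None
-- ===== SOURCE B (Python) =====
-- def _find_grab_key(torrent_name: str, grabbed: dict):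
--     """Collect-and-select: build a ranked candidate list (0 = exact match on
--     stored torrent_name, 1 = key-prefix match) with positions, then pick the
--     lexicographic minimum; no scanning with early returns."""
--     candidates = [
--         ((0 if info.get("torrent_name") == torrent_name else 1), i, key)
--         for i, (key, info) in enumerate(grabbed.items())
--         if info.get("torrent_name") == torrent_name
--         or torrent_name.startswith(key[:100])
--     ]
--     return min(candidates)[2] if candidates else None
-- ===== Notes on version B (the rewrite author's own statement) =====
-- stated objective: alternative
-- what changed: Replaced A's two early-returning scans by a collect-and-select algorithm: build one ranked candidate list ((rank, position, key) with rank 0 for exact matches, 1 for prefix matches) and return the key of the lexicographically minimal candidate.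
import Mathlib
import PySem

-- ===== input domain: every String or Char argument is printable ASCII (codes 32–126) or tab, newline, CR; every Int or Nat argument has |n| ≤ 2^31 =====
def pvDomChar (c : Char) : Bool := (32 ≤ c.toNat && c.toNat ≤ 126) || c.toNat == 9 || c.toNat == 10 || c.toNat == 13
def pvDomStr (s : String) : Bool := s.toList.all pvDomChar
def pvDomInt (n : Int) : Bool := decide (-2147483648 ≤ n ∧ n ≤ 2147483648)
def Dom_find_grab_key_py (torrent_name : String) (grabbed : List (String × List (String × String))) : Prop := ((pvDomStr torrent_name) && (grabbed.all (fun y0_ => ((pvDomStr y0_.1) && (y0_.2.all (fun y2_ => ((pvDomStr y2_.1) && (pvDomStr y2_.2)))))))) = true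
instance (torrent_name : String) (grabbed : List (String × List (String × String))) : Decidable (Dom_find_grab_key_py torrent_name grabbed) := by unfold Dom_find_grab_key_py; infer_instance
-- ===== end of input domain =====

-- B replaces A's two early-returning scans by collect-and-select: build one ranked candidate list and take its lexicographic minimum (alternative decomposition, same cost).


-- ===== PORT A =====
-- first loop: exact match on stored torrent_name (early return)
def pvA_exact (torrent_name : String) : List (String × List (String × String)) → Option String
  | [] => none
  | (key, info) :: rest =>
    if PySem.Dict.get? (PySem.Dict.mk info) "torrent_name" == some torrent_name then some key
    else pvA_exact torrent_name rest

-- second loop: key[:100] is a prefix of torrent_name (early return)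
def pvA_prefix (torrent_name : String) : List (String × List (String × String)) → Option String
  | [] => none
  | (key, _) :: rest =>
    if PySem.Str.startswith torrent_name (PySem.Str.slice key none (some 100)) then some key
    else pvA_prefix torrent_name rest

def find_grab_key_py (torrent_name : String) (grabbed : List (String × List (String × String))) : Option String :=
  match pvA_exact torrent_name grabbed with
  | some key => some key
  | none => pvA_prefix torrent_name grabbed

-- ===== PORT B =====
-- the list comprehension: enumerated entries that match, as (rank, index, key)
def pvCand (torrent_name : String) : Int → List (String × List (String × String)) → List (Int × Int × String)
  | _, [] => []
  | i, (key, info) :: rest =>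
    if PySem.Dict.get? (PySem.Dict.mk info) "torrent_name" == some torrent_name
       || PySem.Str.startswith torrent_name (PySem.Str.slice key none (some 100)) then
      ((if PySem.Dict.get? (PySem.Dict.mk info) "torrent_name" == some torrent_name then 0 else 1), i, key)
        :: pvCand torrent_name (i + 1) rest
    else pvCand torrent_name (i + 1) rest

-- Python's tuple `<` (lexicographic; string compare is codepoint-wise, exact on the ASCII domain)
def pvLt (a b : Int × Int × String) : Bool :=
  decide (a.1 < b.1) || (a.1 == b.1 && (decide (a.2.1 < b.2.1) || (a.2.1 == b.2.1 && decide (a.2.2 < b.2.2))))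

-- Python's min over a nonempty list: first minimal element wins
def pvMin (h : Int × Int × String) (t : List (Int × Int × String)) : Int × Int × String :=
  t.foldl (fun acc x => if pvLt x acc then x else acc) h

def find_grab_key_py_alt (torrent_name : String) (grabbed : List (String × List (String × String))) : Option String :=
  match pvCand torrent_name 0 grabbed with
  | [] => none
  | h :: t => some (pvMin h t).2.2

-- ===== PRECONDITION & SPEC =====
def Spec_find_grab_key_py (torrent_name : String) (grabbed : List (String × List (String × String))) (out : Option String) : Prop := out = find_grab_key_py_alt torrent_name grabbed
instance (torrent_name : String) (grabbed : List (String × List (String × String))) (out : Option String) : Decidable (Spec_find_grab_key_py torrent_name grabbed out) := by unfold Spec_find_grab_key_py; infer_instance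

-- ===== CLAIM (what is proved, stated in full; the proofs are below) =====
def Claim_equal_find_grab_key_py : Prop := ∀ (torrent_name : String) (grabbed : List (String × List (String × String))), Dom_find_grab_key_py torrent_name grabbed → Spec_find_grab_key_py torrent_name grabbed (find_grab_key_py torrent_name grabbed)

-- ===== LEMMAS AND PROOFS =====
-- facts about the lexicographic comparison used by min
theorem pvLt_false_of_zero (x a : Int × Int × String) (hx : 0 ≤ x.1) (h0 : a.1 = 0)
    (hi : a.2.1 < x.2.1) : pvLt x a = false := by
  have h1 : decide (x.1 < a.1) = false := by simp [h0]; omega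
  have h2 : decide (x.2.1 < a.2.1) = false := by simp; omega
  have h3 : (x.2.1 == a.2.1) = false := by simp [beq_eq_false_iff_ne]; omega
  simp [pvLt, h1, h2, h3]

theorem pvLt_false_of_one (x a : Int × Int × String) (hx : x.1 = 1) (h1 : a.1 = 1)
    (hi : a.2.1 < x.2.1) : pvLt x a = false := by
  have g1 : decide (x.1 < a.1) = false := by simp [hx, h1]
  have g2 : decide (x.2.1 < a.2.1) = false := by simp; omega
  have g3 : (x.2.1 == a.2.1) = false := by simp [beq_eq_false_iff_ne]; omega
  simp [pvLt, g1, g2, g3]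

theorem pvLt_true_zero_one (x a : Int × Int × String) (hx : x.1 = 0) (h1 : a.1 = 1) :
    pvLt x a = true := by
  simp [pvLt, hx, h1]

-- A rank-0 accumulator whose index is below every candidate index survives the fold untouched.
theorem pvMin_keep_zero (tn : String) (gs : List (String × List (String × String))) :
    ∀ (i : Int) (a : Int × Int × String), a.1 = 0 → a.2.1 < i →
      (pvCand tn i gs).foldl (fun acc x => if pvLt x acc then x else acc) a = a := by
  induction gs with
  | nil => intro i a _ _; simp [pvCand]
  | cons kv rest ih =>
    intro i a h0 hlt
    obtain ⟨key, info⟩ := kv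
    simp only [pvCand]
    split
    · simp only [List.foldl_cons]
      rw [pvLt_false_of_zero _ a (by dsimp only; split <;> omega) h0 hlt]
      simp only [Bool.false_eq_true, if_false]
      exact ih (i + 1) a h0 (by omega)
    · exact ih (i + 1) a h0 (by omega)

-- A rank-1 accumulator below all candidate indices: the fold returns the first exact match
-- (as a rank-0 candidate) if one exists in the suffix, and otherwise the accumulator itself.
theorem pvMin_one (tn : String) (gs : List (String × List (String × String))) :
    ∀ (i : Int) (a : Int × Int × String), a.1 = 1 → a.2.1 < i →
      (match pvA_exact tn gs with
       | some k => ∃ j : Int, (pvCand tn i gs).foldl (fun acc x => if pvLt x acc then x else acc) a = (0, j, k)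
       | none => (pvCand tn i gs).foldl (fun acc x => if pvLt x acc then x else acc) a = a) := by
  induction gs with
  | nil => intro i a _ _; simp [pvCand, pvA_exact]
  | cons kv rest ih =>
    intro i a h1 hlt
    obtain ⟨key, info⟩ := kv
    by_cases hex : PySem.Dict.get? (PySem.Dict.mk info) "torrent_name" == some tn
    · -- head is an exact match: accumulator is replaced by (0, i, key), which then survives
      simp only [pvA_exact, pvCand, hex, if_true, Bool.true_or, List.foldl_cons]
      rw [pvLt_true_zero_one _ a rfl h1]
      simp only [if_true]
      exact ⟨i, pvMin_keep_zero tn rest (i + 1) (0, i, key) rfl (by show i < i + 1; omega)⟩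
    · simp only [pvA_exact, pvCand, hex, Bool.false_eq_true, if_false, Bool.false_or]
      by_cases hpf : PySem.Str.startswith tn (PySem.Str.slice key none (some 100))
      · -- head is a prefix-only candidate (rank 1, index i > a's index): accumulator keeps winning
        simp only [hpf, if_true, List.foldl_cons]
        rw [pvLt_false_of_one _ a rfl h1 hlt]
        simp only [Bool.false_eq_true, if_false]
        exact ih (i + 1) a h1 (by omega)
      · -- head contributes no candidate
        simp only [hpf, Bool.false_eq_true, if_false]
        exact ih (i + 1) a h1 (by omega)

-- main induction: selecting the minimum candidate reproduces A's two-scan result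
theorem pv_main (tn : String) (gs : List (String × List (String × String))) :
    ∀ i : Int,
      (match pvCand tn i gs with
       | [] => none
       | h :: t => some (pvMin h t).2.2)
      = (match pvA_exact tn gs with
         | some key => some key
         | none => pvA_prefix tn gs) := by
  induction gs with
  | nil => intro i; simp [pvCand, pvA_exact, pvA_prefix]
  | cons kv rest ih =>
    intro i
    obtain ⟨key, info⟩ := kv
    by_cases hex : PySem.Dict.get? (PySem.Dict.mk info) "torrent_name" == some tn
    · simp only [pvCand, pvA_exact, hex, if_true, Bool.true_or, pvMin]
      rw [pvMin_keep_zero tn rest (i + 1) (0, i, key) rfl (by show i < i + 1; omega)]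
    · by_cases hpf : PySem.Str.startswith tn (PySem.Str.slice key none (some 100))
      · simp only [pvCand, pvA_exact, pvA_prefix, hex, hpf, Bool.false_eq_true, if_false,
          Bool.false_or, if_true, pvMin]
        have := pvMin_one tn rest (i + 1) (1, i, key) rfl (by show i < i + 1; omega)
        cases hE : pvA_exact tn rest with
        | some k =>
          rw [hE] at this
          obtain ⟨j, hj⟩ := this
          simp [hj]
        | none =>
          rw [hE] at this
          simp [this]
      · simp only [pvCand, pvA_exact, pvA_prefix, hex, hpf, Bool.false_eq_true, if_false,
          Bool.false_or]
        exact ih (i + 1)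

-- ===== VERDICT (by name: the statement is the Claim_ definition above) =====
theorem find_grab_key_py_spec : Claim_equal_find_grab_key_py := by
  intro tn grabbed _
  unfold Spec_find_grab_key_py find_grab_key_py find_grab_key_py_alt
  exact (pv_main tn grabbed 0).symm
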